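-- pv_equiv track=rewrite | github.com/tenzin3/serializer | serialize_chonjuk_root.py | get_chapter_info
-- ===== SOURCE A (Python) =====
-- from typing import List, Dict
--
-- def get_chapter_info(segments:List[str])->List[List[str]]:
--     res = {}
--     counter = 0
--     for idx, segment in enumerate(segments):
--         if segment.startswith("ch") or segment.startswith("Ch"):
--             counter += 1
--
--         if counter not in res:
--             res[counter] = [idx+1]
--         else:
--             res[counter].append(idx+1)
--
--     return res
-- ===== SOURCE B (Python) =====
-- def get_chapter_info(segments):
--     # Phase 1: derived sequence of running chapter counters, one per segment.
--     counters = []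
--     c = 0
--     for s in segments:
--         if s.startswith(("ch", "Ch")):
--             c += 1
--         counters.append(c)
--     # Phase 2: the counter never decreases, so equal counters are contiguous;
--     # walk the runs with two indices and emit each run's 1-based index range.
--     res = {}
--     i, n = 0, len(counters)
--     while i < n:
--         j = i + 1
--         while j < n and counters[j] == counters[i]:
--             j += 1
--         res[counters[i]] = list(range(i + 1, j + 1))
--         i = j
--     return res
-- ===== Notes on version B (the rewrite author's own statement) =====
-- stated objective: alternative
-- what changed: A builds the dict in one pass, per element testing 'counter not in res' and appending; B first computes the derived list of running counters, then walks contiguous runs of an equal counter with two indices and emits each run's whole 1-based index range at once.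
import Mathlib
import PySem

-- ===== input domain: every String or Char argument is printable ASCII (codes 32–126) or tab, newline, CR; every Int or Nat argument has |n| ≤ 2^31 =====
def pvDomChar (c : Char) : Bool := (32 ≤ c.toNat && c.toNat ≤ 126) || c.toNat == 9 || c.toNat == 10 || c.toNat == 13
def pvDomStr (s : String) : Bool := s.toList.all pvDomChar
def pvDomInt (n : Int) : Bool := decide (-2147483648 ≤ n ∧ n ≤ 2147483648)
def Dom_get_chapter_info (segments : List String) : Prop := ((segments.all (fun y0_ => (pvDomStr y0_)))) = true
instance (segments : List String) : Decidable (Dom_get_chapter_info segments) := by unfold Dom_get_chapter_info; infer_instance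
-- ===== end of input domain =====

-- B replaces A's per-element dict grouping by a two-phase pass: compute the running
-- chapter counters first, then group contiguous runs of an equal counter (alternative decomposition).

-- ===== PORT A =====
def get_chapter_info (segments : List String) : List (Int × List Int) :=
  let st := (PySem.List.enumerate segments 0).foldl
    (fun (st : PySem.Dict Int (List Int) × Int) p =>
      let counter := if PySem.Str.startswith p.2 "ch" || PySem.Str.startswith p.2 "Ch" then st.2 + 1 else st.2
      let res := if st.1.contains counter = false then st.1.insert counter [p.1 + 1]
                 else st.1.modify counter [] (fun l => l ++ [p.1 + 1])
      (res, counter))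
    (PySem.Dict.empty, 0)
  st.1.items

-- ===== PORT B =====
-- phase 1 of Source B: the list of running chapter counters
def pvCounters (segments : List String) : List Int :=
  (segments.foldl
    (fun (acc : List Int × Int) s =>
      let c := if PySem.Str.startswith s "ch" || PySem.Str.startswith s "Ch" then acc.2 + 1 else acc.2
      (acc.1 ++ [c], c))
    ([], 0)).1

-- phase 2 of Source B: the while loop over positions, as recursion on the suffix of counters
-- (i is the 0-based position of the suffix head; the inner while is takeWhile/dropWhile)
def pvRuns (i : Int) : List Int → List (Int × List Int)
  | [] => []
  | c :: rest =>
      let k := (rest.takeWhile (fun x => x == c)).length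
      (c, PySem.List.pyRange (i + 1) (i + (k : Int) + 2) 1) ::
        pvRuns (i + (k : Int) + 1) (rest.dropWhile (fun x => x == c))
  termination_by l => l.length
  decreasing_by
    simp only [List.length_cons]
    exact Nat.lt_succ_of_le (List.length_dropWhile_le _ _)

def get_chapter_info_alt (segments : List String) : List (Int × List Int) :=
  pvRuns 0 (pvCounters segments)

-- ===== PRECONDITION & SPEC =====
def Spec_get_chapter_info (segments : List String) (out : List (Int × List Int)) : Prop := out = get_chapter_info_alt segments
instance (segments : List String) (out : List (Int × List Int)) : Decidable (Spec_get_chapter_info segments out) := by unfold Spec_get_chapter_info; infer_instance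

-- ===== CLAIM (what is proved, stated in full; the proofs are below) =====
def Claim_equal_get_chapter_info : Prop := ∀ (segments : List String), Dom_get_chapter_info segments → Spec_get_chapter_info segments (get_chapter_info segments)

-- ===== LEMMAS AND PROOFS =====

-- the running-counter sequence, directly as a scan
def pvScanC (c : Int) : List String → List Int
  | [] => []
  | s :: ss =>
      let c' := if PySem.Str.startswith s "ch" || PySem.Str.startswith s "Ch" then c + 1 else c
      c' :: pvScanC c' ss

-- prepend one index v with key k onto a run list (merge into the head run if keys match)
def pvConsRun (k : Int) (v : Int) : List (Int × List Int) → List (Int × List Int)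
  | [] => [(k, [v])]
  | (k', us) :: t => if k' = k then (k, v :: us) :: t else (k, [v]) :: (k', us) :: t

-- merge a pending group (c, vs) onto a run list
def pvMergeC (c : Int) (vs : List Int) : List (Int × List Int) → List (Int × List Int)
  | [] => [(c, vs)]
  | (k, us) :: t => if k = c then (c, vs ++ us) :: t else (c, vs) :: (k, us) :: t

theorem pvCounters_fold (ss : List String) : ∀ (acc : List Int) (c : Int),
    (ss.foldl (fun (acc : List Int × Int) s =>
      let c := if PySem.Str.startswith s "ch" || PySem.Str.startswith s "Ch" then acc.2 + 1 else acc.2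
      (acc.1 ++ [c], c)) (acc, c)).1 = acc ++ pvScanC c ss := by
  induction ss with
  | nil => intro acc c; simp [pvScanC]
  | cons s ss ih =>
      intro acc c
      simp only [List.foldl_cons, pvScanC]
      rw [ih]
      simp

theorem pvRuns_cons (rest : List Int) (c i : Int) :
    pvRuns i (c :: rest) = pvConsRun c (i + 1) (pvRuns (i + 1) rest) := by
  match rest with
  | [] =>
      simp only [pvRuns, pvConsRun, List.takeWhile_nil, List.dropWhile_nil, List.length_nil]
      rw [show i + ((0 : Nat) : Int) + 2 = (i + 1) + 1 by push_cast; ring,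
          PySem.List.pyRange_one_singleton]
  | d :: rest' =>
      by_cases hd : d = c
      · subst hd
        simp only [pvRuns, List.takeWhile_cons, List.dropWhile_cons, beq_self_eq_true,
          if_true, List.length_cons, pvConsRun]
        rw [PySem.List.pyRange_one_cons (by push_cast; omega)]
        have h1 : i + (((List.takeWhile (fun x => x == d) rest').length + 1 : Nat) : Int) + 2
            = i + 1 + ((List.takeWhile (fun x => x == d) rest').length : Int) + 2 := by
          push_cast; ring
        have h2 : i + (((List.takeWhile (fun x => x == d) rest').length + 1 : Nat) : Int) + 1
            = i + 1 + ((List.takeWhile (fun x => x == d) rest').length : Int) + 1 := by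
          push_cast; ring
        rw [h1, h2]
      · have hbe : (d == c) = false := by simp [hd]
        simp only [pvRuns, List.takeWhile_cons, List.dropWhile_cons, hbe, Bool.false_eq_true,
          if_false, List.length_nil]
        rw [show i + ((0 : Nat) : Int) + 2 = (i + 1) + 1 by push_cast; ring,
            show i + ((0 : Nat) : Int) + 1 = i + 1 by push_cast; ring,
            PySem.List.pyRange_one_singleton]
        conv_rhs => rw [pvRuns.eq_def]
        simp [pvConsRun, hd]
        rw [pvRuns.eq_def]

theorem pvMergeC_consRun_same (c v : Int) (vs : List Int) (R : List (Int × List Int)) :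
    pvMergeC c vs (pvConsRun c v R) = pvMergeC c (vs ++ [v]) R := by
  match R with
  | [] => simp [pvConsRun, pvMergeC]
  | (k, us) :: t =>
      simp only [pvConsRun, pvMergeC]
      by_cases h : k = c
      · subst h; simp
      · simp [h]

theorem pvMergeC_consRun_ne (c k v : Int) (vs : List Int) (R : List (Int × List Int)) (h : k ≠ c) :
    pvMergeC c vs (pvConsRun k v R) = (c, vs) :: pvMergeC k [v] R := by
  match R with
  | [] => simp [pvConsRun, pvMergeC, h]
  | (k', us) :: t =>
      simp only [pvConsRun, pvMergeC]
      by_cases h' : k' = k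
      · subst h'; simp [h]
      · simp [h, h']

theorem pvMergeC_single (c v : Int) (R : List (Int × List Int)) :
    pvMergeC c [v] R = pvConsRun c v R := by
  match R with
  | [] => simp [pvConsRun, pvMergeC]
  | (k, us) :: t =>
      simp only [pvConsRun, pvMergeC]
      by_cases h : k = c
      · subst h; simp
      · simp [h]

-- dict facts about a state of the form r₀ ++ [(c, vs)] with no key c in r₀
theorem pvDict_contains_last (r₀ : List (Int × List Int)) (c : Int) (vs : List Int) :
    (PySem.Dict.mk (r₀ ++ [(c, vs)])).contains c = true := by
  simp [PySem.Dict.contains]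

theorem pvDict_contains_ge (r₀ : List (Int × List Int)) (c' : Int)
    (h : ∀ k ∈ r₀.map Prod.fst, k < c') :
    (PySem.Dict.mk r₀).contains c' = false := by
  simp only [PySem.Dict.contains, List.any_eq_false]
  intro p hp
  have := h p.1 (List.mem_map_of_mem hp)
  simp only [beq_iff_eq]
  omega

theorem pvDict_modify_last (r₀ : List (Int × List Int)) (c : Int) (vs : List Int)
    (f : List Int → List Int) (h : ∀ k ∈ r₀.map Prod.fst, k ≠ c) :
    (PySem.Dict.mk (r₀ ++ [(c, vs)])).modify c [] f = PySem.Dict.mk (r₀ ++ [(c, f vs)]) := by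
  have hget : (PySem.Dict.mk (r₀ ++ [(c, vs)])).get? c = some vs := by
    induction r₀ with
    | nil => simp [PySem.Dict.get?_mk_cons]
    | cons p r ih =>
        rw [List.cons_append, PySem.Dict.get?_mk_cons]
        have hne : (p.1 == c) = false := by
          simp only [beq_eq_false_iff_ne, ne_eq]
          exact h p.1 (List.mem_map_of_mem (List.mem_cons_self))
        rw [hne]
        simp only [Bool.false_eq_true, if_false]
        exact ih (fun k hk => h k (List.mem_map.mpr (by
          obtain ⟨q, hq, hq2⟩ := List.mem_map.mp hk
          exact ⟨q, List.mem_cons_of_mem _ hq, hq2⟩)))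
  simp only [PySem.Dict.modify, PySem.Dict.getD, hget, Option.getD_some]
  rw [PySem.Dict.insert, if_pos (pvDict_contains_last r₀ c vs)]
  congr 1
  rw [List.map_append]
  congr 1
  · rw [show r₀.map (fun p => if (p.1 == c) = true then (c, f vs) else p) = r₀.map id by
        apply List.map_congr_left; intro p hp
        have hne : (p.1 == c) = false := by
          simp only [beq_eq_false_iff_ne, ne_eq]
          exact h p.1 (List.mem_map_of_mem hp)
        simp [hne], List.map_id]
  · simp

theorem pvDict_insert_fresh (r₀ : List (Int × List Int)) (c' : Int) (w : List Int)
    (h : ∀ k ∈ r₀.map Prod.fst, k < c') :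
    (PySem.Dict.mk r₀).insert c' w = PySem.Dict.mk (r₀ ++ [(c', w)]) := by
  rw [PySem.Dict.insert, if_neg (by simp [pvDict_contains_ge r₀ c' h])]

theorem pvA_main (ss : List String) : ∀ (i c : Int) (r₀ : List (Int × List Int)) (vs : List Int),
    (∀ k ∈ r₀.map Prod.fst, k < c) →
    (((PySem.List.enumerate ss i).foldl
      (fun (st : PySem.Dict Int (List Int) × Int) p =>
        let counter := if PySem.Str.startswith p.2 "ch" || PySem.Str.startswith p.2 "Ch" then st.2 + 1 else st.2
        let res := if st.1.contains counter = false then st.1.insert counter [p.1 + 1]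
                   else st.1.modify counter [] (fun l => l ++ [p.1 + 1])
        (res, counter))
      (⟨r₀ ++ [(c, vs)]⟩, c)).1).items
    = r₀ ++ pvMergeC c vs (pvRuns i (pvScanC c ss)) := by
  induction ss with
  | nil =>
      intro i c r₀ vs h
      simp [PySem.List.enumerate, pvScanC, pvRuns, pvMergeC]
  | cons s ss ih =>
      intro i c r₀ vs h
      rw [PySem.List.enumerate_cons, List.foldl_cons]
      by_cases hb : (PySem.Str.startswith s "ch" || PySem.Str.startswith s "Ch") = true
      · -- chapter marker: counter becomes c + 1, a fresh key is appended
        simp only [hb, if_true]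
        rw [if_pos (by
          exact pvDict_contains_ge (r₀ ++ [(c, vs)]) (c + 1) (by
            intro k hk
            simp only [List.map_append, List.mem_append, List.map_cons] at hk
            rcases hk with hk | hk
            · have := h k hk; omega
            · simp at hk; omega))]
        rw [pvDict_insert_fresh (r₀ ++ [(c, vs)]) (c + 1) [i + 1] (by
            intro k hk
            simp only [List.map_append, List.mem_append, List.map_cons] at hk
            rcases hk with hk | hk
            · have := h k hk; omega
            · simp at hk; omega)]
        rw [ih (i + 1) (c + 1) (r₀ ++ [(c, vs)]) [i + 1] (by
            intro k hk
            simp only [List.map_append, List.mem_append, List.map_cons] at hk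
            rcases hk with hk | hk
            · have := h k hk; omega
            · simp at hk; omega)]
        rw [show pvScanC c (s :: ss) = (c + 1) :: pvScanC (c + 1) ss by
          simp only [pvScanC]; rw [if_pos hb]]
        rw [pvRuns_cons, pvMergeC_consRun_ne c (c + 1) (i + 1) vs _ (by omega)]
        simp
      · -- no chapter marker: counter stays c, index joins the last (key c) group
        simp only [hb, if_false, Bool.false_eq_true]
        rw [if_neg (by simp [pvDict_contains_last r₀ c vs])]
        rw [pvDict_modify_last r₀ c vs _ (by
            intro k hk
            have := h k hk; omega)]
        rw [ih (i + 1) c r₀ (vs ++ [i + 1]) h]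
        rw [show pvScanC c (s :: ss) = c :: pvScanC c ss by
          simp only [pvScanC]; rw [if_neg hb]]
        rw [pvRuns_cons, pvMergeC_consRun_same]

-- ===== VERDICT (by name: the statement is the Claim_ definition above) =====
theorem get_chapter_info_spec : Claim_equal_get_chapter_info := by
  unfold Claim_equal_get_chapter_info
  intro segments _
  unfold Spec_get_chapter_info get_chapter_info get_chapter_info_alt
  rw [show pvCounters segments = pvScanC 0 segments by
    unfold pvCounters; rw [pvCounters_fold]; simp]
  cases segments with
  | nil => simp [PySem.List.enumerate, pvScanC, pvRuns, PySem.Dict.empty]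
  | cons s ss =>
      rw [PySem.List.enumerate_cons, List.foldl_cons]
      by_cases hb : (PySem.Str.startswith s "ch" || PySem.Str.startswith s "Ch") = true
      · simp only [hb, if_true]
        rw [if_pos (by simp [PySem.Dict.contains, PySem.Dict.empty])]
        rw [show (PySem.Dict.empty : PySem.Dict Int (List Int)).insert ((0 : Int) + 1) [(0 : Int) + 1]
              = ⟨[] ++ [((0 : Int) + 1, [(0 : Int) + 1])]⟩ from
            pvDict_insert_fresh [] ((0 : Int) + 1) [(0 : Int) + 1] (by simp)]
        rw [pvA_main ss (0 + 1) (0 + 1) [] [(0 : Int) + 1] (by simp)]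
        rw [List.nil_append, pvMergeC_single]
        rw [show pvScanC 0 (s :: ss) = ((0 : Int) + 1) :: pvScanC ((0 : Int) + 1) ss by
          simp only [pvScanC]; rw [if_pos hb]]
        rw [pvRuns_cons]
      · simp only [hb, if_false, Bool.false_eq_true]
        rw [if_pos (by simp [PySem.Dict.contains, PySem.Dict.empty])]
        rw [show (PySem.Dict.empty : PySem.Dict Int (List Int)).insert (0 : Int) [(0 : Int) + 1]
              = ⟨[] ++ [((0 : Int), [(0 : Int) + 1])]⟩ from
            pvDict_insert_fresh [] (0 : Int) [(0 : Int) + 1] (by simp)]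
        rw [pvA_main ss (0 + 1) 0 [] [(0 : Int) + 1] (by simp)]
        rw [List.nil_append, pvMergeC_single]
        rw [show pvScanC 0 (s :: ss) = (0 : Int) :: pvScanC (0 : Int) ss by
          simp only [pvScanC]; rw [if_neg hb]]
        rw [pvRuns_cons]
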